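-- pv_equiv track=rewrite | github.com/geib7592/fun | fun/aoc2022/day06.py | solution
-- ===== SOURCE A (Python) =====
-- def solution(data: str, part=1):
--     if part == 1:
--         # marker size
--         m_size = 4
--     elif part == 2:
--         m_size = 14
--
--     for i in range(len(data) - m_size):
--         s = data[i : i + m_size]
--         if len(set(s)) == m_size:
--             return i + m_size
--     return len(data)
-- ===== SOURCE B (Python) =====
-- def solution(data: str, part=1):
--     if part == 1:
--         m_size = 4
--     elif part == 2:
--         m_size = 14
--
--     # single pass: `start` is the left edge of the longest duplicate-free
--     # window ending at the current position, maintained via last-occurrence indices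
--     last = {}
--     start = 0
--     for e, c in enumerate(data):
--         p = last.get(c, -1)
--         if p >= start:
--             start = p + 1
--         last[c] = e
--         if e + 1 - start >= m_size:
--             return e + 1
--     return len(data)
-- ===== Notes on version B (the rewrite author's own statement) =====
-- stated objective: faster
-- what changed: Replaces A's per-index rebuild of set(data[i:i+m_size]) by a single left-pointer sliding-window pass over the whole string that tracks each character's last occurrence in a dict and returns at the first duplicate-free window of size m_size; Pre_ excludes part not in {1,2}, where A raises NameError.
import Mathlib
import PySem

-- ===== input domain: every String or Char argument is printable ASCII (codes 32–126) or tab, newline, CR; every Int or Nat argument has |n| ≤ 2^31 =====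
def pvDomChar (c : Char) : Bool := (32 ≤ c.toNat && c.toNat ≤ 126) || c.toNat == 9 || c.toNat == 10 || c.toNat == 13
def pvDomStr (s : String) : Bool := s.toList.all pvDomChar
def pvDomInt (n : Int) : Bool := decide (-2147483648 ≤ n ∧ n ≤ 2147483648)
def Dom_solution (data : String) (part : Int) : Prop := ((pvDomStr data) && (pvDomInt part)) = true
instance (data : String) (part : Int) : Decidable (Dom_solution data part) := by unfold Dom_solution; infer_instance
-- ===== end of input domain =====

-- B replaces the rebuild-a-set-per-window scan by a single left-pointer pass over the
-- string using last-occurrence indices (objective: faster, constant-factor).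


-- ===== PORT A =====
-- the for-loop: i runs over range(len(data) - m_size); k is the number of remaining iterations.
-- data[i : i+m] for 0 ≤ i is (l.drop i).take m (PySem.List.slice_natCast_add); set(s) is PySem.Set.ofList.
def solAGo (l : List Char) (m : Nat) : Nat → Nat → Int
  | _, 0 => (l.length : Int)
  | i, k+1 =>
    if (PySem.Set.ofList ((l.drop i).take m)).length = m then ((i + m : Nat) : Int)
    else solAGo l m (i+1) k

def solution (data : String) (part : Int) : Int :=
  if part = 1 then solAGo data.toList 4 0 (data.toList.length - 4)
  else if part = 2 then solAGo data.toList 14 0 (data.toList.length - 14)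
  else (data.toList.length : Int)  -- unreachable under Pre_solution (Python raises NameError)

-- ===== PORT B =====
-- 'for e, c in enumerate(data)': e counts 0..len-1, c = data[e] (exact: l.getD e ' ' with e < len);
-- k is the number of remaining iterations. State: `last` = last-occurrence dict, `start` = left pointer.
def solBGo (l : List Char) (m : Nat) : PySem.Dict Char Int → Int → Nat → Nat → Int
  | _, _, _, 0 => (l.length : Int)
  | last, start, e, k+1 =>
    let c := l.getD e ' '
    let p := last.getD c (-1)
    let start' := if start ≤ p then p + 1 else start
    let last' := last.insert c (e : Int)
    if (m : Int) ≤ (e : Int) + 1 - start' then ((e + 1 : Nat) : Int)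
    else solBGo l m last' start' (e+1) k

def solution_alt (data : String) (part : Int) : Int :=
  if part = 1 then solBGo data.toList 4 PySem.Dict.empty 0 0 data.toList.length
  else if part = 2 then solBGo data.toList 14 PySem.Dict.empty 0 0 data.toList.length
  else (data.toList.length : Int)  -- unreachable under Pre_solution (Python raises NameError)

-- ===== PRECONDITION & SPEC =====
-- Pre_ excludes part ∉ {1, 2}: there m_size is never assigned and the Python raises NameError.
def Pre_solution (data : String) (part : Int) : Prop := part = 1 ∨ part = 2
instance (data : String) (part : Int) : Decidable (Pre_solution data part) := by
  unfold Pre_solution; infer_instance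
def pvWitness_solution : String × Int := ("mjqjpqmgbljsphdztnv", 1)

def Spec_solution (data : String) (part : Int) (out : Int) : Prop := out = solution_alt data part
instance (data : String) (part : Int) (out : Int) : Decidable (Spec_solution data part out) := by
  unfold Spec_solution; infer_instance

-- ===== CLAIM (what is proved, stated in full; the proofs are below) =====
def Claim_equal_solution : Prop := ∀ (data : String) (part : Int), Dom_solution data part → Pre_solution data part → Spec_solution data part (solution data part)

-- ===== LEMMAS AND PROOFS =====

-- window data[s:e] as a char list
def pvW (l : List Char) (s e : Nat) : List Char := (l.drop s).take (e - s)

-- index of the last occurrence of c in l[0:e] (-1 if none)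
def pvLastOcc (l : List Char) : Nat → Char → Int
  | 0, _ => -1
  | e+1, c => if l[e]? = some c then (e : Int) else pvLastOcc l e c

-- loop invariant of B after processing l[0:e]
def pvInv (l : List Char) (e : Nat) (start : Int) (last : PySem.Dict Char Int) : Prop :=
  0 ≤ start ∧ start.toNat ≤ e ∧ (pvW l start.toNat e).Nodup ∧
  (∀ s : Nat, s < start.toNat → ¬ (pvW l s e).Nodup) ∧
  (∀ c, last.getD c (-1) = pvLastOcc l e c)

lemma pvLastOcc_lt (l : List Char) (e : Nat) (c : Char) : pvLastOcc l e c < (e : Int) := by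
  induction e with
  | zero => simp [pvLastOcc]
  | succ e ih =>
    simp only [pvLastOcc]
    split
    · push_cast; omega
    · push_cast at *; omega

lemma pvLastOcc_ge (l : List Char) (e j : Nat) (c : Char) (hj : j < e) (h : l[j]? = some c) :
    (j : Int) ≤ pvLastOcc l e c := by
  induction e with
  | zero => omega
  | succ e ih =>
    simp only [pvLastOcc]
    split
    · omega
    · rename_i hne
      have hje : j ≠ e := by rintro rfl; exact hne h
      have := ih (by omega)
      push_cast at *; omega

lemma pvLastOcc_get (l : List Char) (e : Nat) (c : Char) (h : 0 ≤ pvLastOcc l e c) :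
    l[(pvLastOcc l e c).toNat]? = some c := by
  induction e with
  | zero => simp [pvLastOcc] at h
  | succ e ih =>
    by_cases hg : l[e]? = some c
    · simp only [pvLastOcc, if_pos hg]
      simpa using hg
    · simp only [pvLastOcc, if_neg hg] at h ⊢
      exact ih h

lemma pvW_mono_left (l : List Char) (s s' e : Nat) (h : s ≤ s')
    (hn : (pvW l s e).Nodup) : (pvW l s' e).Nodup := by
  have heq : pvW l s' e = (pvW l s e).drop (s' - s) := by
    simp only [pvW, List.drop_take, List.drop_drop]
    congr 1
    · omega
    · congr 1; omega
  rw [heq]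
  exact hn.sublist (List.drop_sublist _ _)

lemma pvW_succ (l : List Char) (s e : Nat) (hs : s ≤ e) (he : e < l.length) :
    pvW l s (e+1) = pvW l s e ++ [l[e]'he] := by
  simp only [pvW]
  rw [show e + 1 - s = (e - s) + 1 by omega, List.take_add_one]
  congr 1
  have : (l.drop s)[e - s]? = l[e]? := by
    rw [List.getElem?_drop]
    congr 1; omega
  rw [this, List.getElem?_eq_getElem he]
  rfl

lemma pvW_getElem? (l : List Char) (s e j : Nat) (h1 : s ≤ j) (h2 : j < e) :
    (pvW l s e)[j - s]? = l[j]? := by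
  simp only [pvW]
  rw [List.getElem?_take_of_lt (by omega), List.getElem?_drop]
  congr 1; omega

lemma pvW_mem (l : List Char) (s e : Nat) (c : Char) (h : c ∈ pvW l s e) :
    ∃ j : Nat, s ≤ j ∧ j < e ∧ l[j]? = some c := by
  obtain ⟨i, hi, hgi⟩ := List.mem_iff_getElem.mp h
  have hlen : (pvW l s e).length = min (e - s) (l.length - s) := by
    simp [pvW]
  refine ⟨s + i, by omega, by omega, ?_⟩
  have : (pvW l s e)[(s + i) - s]? = l[s + i]? := pvW_getElem? l s e (s + i) (by omega) (by omega)
  rw [show s + i - s = i by omega] at this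
  rw [← this, List.getElem?_eq_getElem hi, hgi]

lemma pvW_not_nodup (l : List Char) (s e j1 j2 : Nat) (c : Char)
    (h1 : s ≤ j1) (h2 : j1 < j2) (h3 : j2 < e) (h4 : j2 < l.length)
    (g1 : l[j1]? = some c) (g2 : l[j2]? = some c) : ¬ (pvW l s e).Nodup := by
  intro hnd
  have e1 : (pvW l s e)[j1 - s]? = some c := by rw [pvW_getElem? l s e j1 h1 (by omega)]; exact g1
  have e2 : (pvW l s e)[j2 - s]? = some c := by rw [pvW_getElem? l s e j2 (by omega) h3]; exact g2
  have hlen : (pvW l s e).length = min (e - s) (l.length - s) := by simp [pvW]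
  have : j1 - s = j2 - s :=
    List.getElem?_inj (by omega) hnd (by rw [e1, e2])
  omega

lemma pvNodupConcat (xs : List Char) (x : Char) : (xs ++ [x]).Nodup ↔ x ∉ xs ∧ xs.Nodup := by
  rw [← List.concat_eq_append]
  exact List.nodup_concat xs x

lemma pvOfList_len_iff (xs : List Char) : (PySem.Set.ofList xs).length = xs.length ↔ xs.Nodup := by
  constructor
  · intro h
    have hfs : (PySem.Set.ofList xs).toFinset = xs.toFinset := by
      ext a; simp [PySem.Set.mem_ofList]
    have hc : (PySem.Set.ofList xs).toFinset.card = (PySem.Set.ofList xs).length :=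
      List.toFinset_card_of_nodup (PySem.Set.nodup_ofList xs)
    have : xs.toFinset.card = xs.length := by rw [← hfs, hc, h]
    have hm := Multiset.toFinset_card_eq_card_iff_nodup (m := (xs : Multiset Char))
    simpa using hm.mp (by simpa using this)
  · intro h
    rw [PySem.Set.ofList_eq_self_of_nodup xs h]

-- invariant holds initially
lemma pvInv_init (l : List Char) : pvInv l 0 0 PySem.Dict.empty := by
  refine ⟨le_refl 0, by simp, by simp [pvW], by omega, ?_⟩
  intro c
  simp [pvLastOcc, PySem.Dict.getD_empty]

-- the dict component of the invariant is preserved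
lemma pvLast_upd (l : List Char) (e : Nat) (last : PySem.Dict Char Int) (c : Char)
    (hg : l[e]? = some c)
    (h5 : ∀ c', last.getD c' (-1) = pvLastOcc l e c') :
    ∀ c', (last.insert c (e : Int)).getD c' (-1) = pvLastOcc l (e+1) c' := by
  intro c'
  rw [PySem.Dict.getD_insert]
  simp only [pvLastOcc, hg]
  by_cases hcc : c' = c
  · subst hcc; simp
  · rw [if_neg hcc, if_neg (by simp [Option.some.injEq]; intro hq; exact hcc hq.symm), h5 c']

-- invariant is preserved by one step of B
lemma pvInv_step (l : List Char) (e : Nat) (start : Int) (last : PySem.Dict Char Int)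
    (he : e < l.length) (h : pvInv l e start last) :
    pvInv l (e+1)
      (if start ≤ last.getD (l.getD e ' ') (-1) then last.getD (l.getD e ' ') (-1) + 1 else start)
      (last.insert (l.getD e ' ') (e : Int)) := by
  obtain ⟨h0, h1, h2, h3, h5⟩ := h
  have hc : l.getD e ' ' = l[e]'he := List.getD_eq_getElem l ' ' he
  have hg : l[e]? = some (l.getD e ' ') := by rw [hc]; exact List.getElem?_eq_getElem he
  set c := l.getD e ' ' with hcdef
  have hp : last.getD c (-1) = pvLastOcc l e c := h5 c
  have hplt : pvLastOcc l e c < (e : Int) := pvLastOcc_lt l e c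
  set start1 := if start ≤ last.getD c (-1) then last.getD c (-1) + 1 else start with hs1
  have hlt : pvLastOcc l e c < start1 := by
    rw [hs1]; split <;> omega
  have hge : start ≤ start1 := by
    rw [hs1]; split <;> omega
  have h0' : 0 ≤ start1 := le_trans h0 hge
  have hle : start1 ≤ (e : Int) := by
    rw [hs1]; split
    · omega
    · omega
  have hnotmem : l[e]'he ∉ pvW l start1.toNat e := by
    intro hmem
    obtain ⟨j, hj1, hj2, hj3⟩ := pvW_mem l start1.toNat e _ hmem
    have hjc : l[j]? = some c := by rw [hj3, hc]
    have := pvLastOcc_ge l e j c hj2 hjc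
    omega
  refine ⟨h0', by omega, ?_, ?_, pvLast_upd l e last c hg h5⟩
  · rw [pvW_succ l start1.toNat e (by omega) he, pvNodupConcat]
    exact ⟨hnotmem, pvW_mono_left l start.toNat start1.toNat e (by omega) h2⟩
  · intro s hs hnd
    rcases lt_or_ge s start.toNat with hcase | hcase
    · rw [pvW_succ l s e (by omega) he, pvNodupConcat] at hnd
      exact h3 s hcase hnd.2
    · -- the branch start ≤ p must have been taken
      have hb : start ≤ last.getD c (-1) := by
        by_contra hnb
        rw [hs1, if_neg hnb] at hs
        omega
      rw [hs1, if_pos hb] at hs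
      have hp0 : 0 ≤ pvLastOcc l e c := by omega
      have hpg : l[(pvLastOcc l e c).toNat]? = some c := pvLastOcc_get l e c hp0
      exact pvW_not_nodup l s (e+1) (pvLastOcc l e c).toNat e c (by omega) (by omega)
        (by omega) he hpg hg hnd

-- B's return test, read through the invariant
lemma pvInv_test (l : List Char) (e : Nat) (start : Int) (last : PySem.Dict Char Int) (m : Nat)
    (h : pvInv l (e+1) start last) :
    ((m : Int) ≤ (e : Int) + 1 - start ↔ (m ≤ e + 1 ∧ (pvW l (e+1-m) (e+1)).Nodup)) := by
  obtain ⟨h0, h1, h2, h3, _⟩ := h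
  constructor
  · intro hle
    have hm1 : m ≤ e + 1 := by omega
    exact ⟨hm1, pvW_mono_left l start.toNat (e+1-m) (e+1) (by omega) h2⟩
  · rintro ⟨hm1, hnd⟩
    by_contra hcon
    exact h3 (e+1-m) (by omega) hnd

-- one-step unfolding of B's loop (keeps simp from unfolding two steps at k+2)
lemma pvBstep (l : List Char) (m : Nat) (last : PySem.Dict Char Int) (start : Int) (e k : Nat) :
    solBGo l m last start e (k+1) =
      (if (m : Int) ≤ (e : Int) + 1 -
            (if start ≤ last.getD (l.getD e ' ') (-1) then last.getD (l.getD e ' ') (-1) + 1 else start)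
        then ((e + 1 : Nat) : Int)
        else solBGo l m (last.insert (l.getD e ' ') (e : Int))
          (if start ≤ last.getD (l.getD e ' ') (-1) then last.getD (l.getD e ' ') (-1) + 1 else start)
          (e+1) k) := rfl

-- the main lockstep lemma: B with k+1 remaining iterations vs A with k remaining iterations
-- (B's extra final iteration, at e = len-1, returns len either way, matching A's base case).
lemma pvMain (l : List Char) (m : Nat) (hm : 1 ≤ m) :
    ∀ (k e : Nat) (start : Int) (last : PySem.Dict Char Int),
      pvInv l e start last → e + k = l.length - 1 → 1 ≤ l.length →
      solBGo l m last start e (k+1) =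
        if m ≤ e + 1 then solAGo l m (e + 1 - m) k else solAGo l m 0 (k - (m - 1 - e)) := by
  intro k
  induction k with
  | zero =>
    intro e start last hInv hk hl
    have he : e < l.length := by omega
    have heq : e + 1 = l.length := by omega
    rw [pvBstep]
    set start1 := if start ≤ last.getD (l.getD e ' ') (-1)
      then last.getD (l.getD e ' ') (-1) + 1 else start with hs1
    have hInv' : pvInv l (e+1) start1 (last.insert (l.getD e ' ') (e:Int)) :=
      pvInv_step l e start last he hInv
    by_cases hret : (m:Int) ≤ (e:Int) + 1 - start1
    · rw [if_pos hret]
      obtain ⟨hm1, _⟩ := (pvInv_test l e start1 _ m hInv').mp hret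
      rw [if_pos hm1]
      simp only [solAGo]
      push_cast
      omega
    · rw [if_neg hret]
      simp only [solBGo]
      split <;> simp [solAGo]
  | succ k ih =>
    intro e start last hInv hk hl
    have hn : e < l.length := by omega
    rw [pvBstep]
    set c := l.getD e ' ' with hc
    set p := last.getD c (-1) with hpdef
    set start1 := if start ≤ p then p + 1 else start with hs1
    have hInv' : pvInv l (e+1) start1 (last.insert c (e:Int)) := pvInv_step l e start last hn hInv
    have htest := pvInv_test l e start1 (last.insert c (e:Int)) m hInv'
    by_cases hret : (m:Int) ≤ (e:Int) + 1 - start1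
    · rw [if_pos hret]
      obtain ⟨hm1, hnd⟩ := htest.mp hret
      rw [if_pos hm1]
      have hwin : (l.drop (e+1-m)).take m = pvW l (e+1-m) (e+1) := by
        simp only [pvW]; congr 1; omega
      have hee : e + 1 ≤ l.length := by omega
      have hlen : (pvW l (e+1-m) (e+1)).length = m := by
        simp only [pvW, List.length_take, List.length_drop]
        omega
      simp only [solAGo]
      rw [if_pos (by rw [hwin, PySem.Set.ofList_eq_self_of_nodup _ hnd, hlen])]
      push_cast; omega
    · rw [if_neg hret]
      have hrec := ih (e+1) start1 (last.insert c (e:Int)) hInv' (by omega) hl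
      rw [hrec]
      by_cases hm1 : m ≤ e + 1
      · rw [if_pos hm1, if_pos (by omega : m ≤ (e+1) + 1)]
        have hwin : (l.drop (e+1-m)).take m = pvW l (e+1-m) (e+1) := by
          simp only [pvW]; congr 1; omega
        have hnnd : ¬ (pvW l (e+1-m) (e+1)).Nodup := fun hnd => hret (htest.mpr ⟨hm1, hnd⟩)
        have hee : e + 1 ≤ l.length := by omega
        have hlen : (pvW l (e+1-m) (e+1)).length = m := by
          simp only [pvW, List.length_take, List.length_drop]
          omega
        simp only [solAGo]
        rw [if_neg (by
          intro hlen_eq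
          exact hnnd ((pvOfList_len_iff _).1 (by rw [hwin] at hlen_eq; rw [hlen_eq, hlen])))]
        congr 1
        omega
      · rw [if_neg hm1]
        by_cases hm2 : m ≤ (e + 1) + 1
        · rw [if_pos hm2, show (e+1)+1-m = 0 from by omega,
            show (k+1)-(m-1-e) = k from by omega]
        · rw [if_neg hm2, show (k+1)-(m-1-e) = k - (m-1-(e+1)) from by omega]

lemma pvTop (l : List Char) (m : Nat) (hm : 1 ≤ m) :
    solAGo l m 0 (l.length - m) = solBGo l m PySem.Dict.empty 0 0 l.length := by
  rcases Nat.eq_zero_or_pos l.length with hl | hl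
  · rw [show l.length - m = 0 from by omega, hl]
    simp [solAGo, solBGo]
  · have h := pvMain l m hm (l.length - 1) 0 0 PySem.Dict.empty (pvInv_init l) (by omega) (by omega)
    rw [show (l.length - 1) + 1 = l.length from by omega] at h
    rw [h]
    by_cases h1 : m ≤ 0 + 1
    · rw [if_pos h1, show 0 + 1 - m = 0 from by omega,
        show l.length - m = l.length - 1 from by omega]
    · rw [if_neg h1, show l.length - 1 - (m - 1 - 0) = l.length - m from by omega]

-- ===== VERDICT (by name: the statement is the Claim_ definition above) =====
theorem solution_spec : Claim_equal_solution := by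
  intro data part _ hpre
  unfold Spec_solution solution solution_alt
  rcases hpre with h | h <;> subst h <;> simp <;>
    [exact pvTop data.toList 4 (by omega); exact pvTop data.toList 14 (by omega)]
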